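-- pv_equiv track=rewrite | github.com/boranseckin/codewars | python/break_camelCase.py | break_camelcase
-- ===== SOURCE A (Python) =====
-- def break_camelcase(string):
--     result = ''
--     last = 0
--
--     for i in range(len(string)):
--         if string[i].isupper():
--             result += f'{string[last:i]} '
--             last = i
--
--     result += string[last:]
--
--     return result
-- ===== SOURCE B (Python) =====
-- def break_camelcase(string):
--     return ''.join(' ' + c if c.isupper() else c for c in string)
-- ===== Notes on version B (the rewrite author's own statement) =====
-- stated objective: idiomatic
-- what changed: Replaces the last-index/substring-slice accumulator loop with a single per-character pass that emits a space before each uppercase character and joins once.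
import Mathlib
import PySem

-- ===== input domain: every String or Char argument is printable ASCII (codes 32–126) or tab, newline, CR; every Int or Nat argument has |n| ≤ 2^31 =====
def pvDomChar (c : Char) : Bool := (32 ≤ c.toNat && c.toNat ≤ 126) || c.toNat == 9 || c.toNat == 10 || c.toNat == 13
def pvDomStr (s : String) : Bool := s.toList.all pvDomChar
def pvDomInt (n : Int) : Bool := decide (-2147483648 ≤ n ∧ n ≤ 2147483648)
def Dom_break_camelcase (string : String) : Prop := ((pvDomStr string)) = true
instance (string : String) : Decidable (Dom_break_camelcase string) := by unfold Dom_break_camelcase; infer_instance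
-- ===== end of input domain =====

-- B replaces A's last-index/slice accumulator loop with a per-character map joined once (idiomatic; same result).


-- ===== PORT A =====
-- loop body of A: on uppercase string[i], flush string[last:i] plus a space and set last := i
def pvStepA (s : List Char) (st : List Char × Int) (i : Int) : List Char × Int :=
  if PySem.Chars.isupper (PySem.List.pyGetD s i ' ') then
    (st.1 ++ PySem.List.slice s (some st.2) (some i) ++ [' '], i)
  else st

def break_camelcase (string : String) : String :=
  let s := string.toList
  let st := (PySem.List.pyRange 0 (s.length : Int) 1).foldl (pvStepA s) ([], 0)
  String.ofList (st.1 ++ PySem.List.slice s (some st.2) none)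

-- ===== PORT B =====
def break_camelcase_alt (string : String) : String :=
  String.ofList (PySem.Chars.join []
    (string.toList.map (fun c => if PySem.Chars.isupper c then [' ', c] else [c])))

-- ===== PRECONDITION & SPEC =====
def Spec_break_camelcase (string : String) (out : String) : Prop := out = break_camelcase_alt string
instance (string : String) (out : String) : Decidable (Spec_break_camelcase string out) := by unfold Spec_break_camelcase; infer_instance

-- ===== CLAIM (what is proved, stated in full; the proofs are below) =====
def Claim_equal_break_camelcase : Prop := ∀ (string : String), Dom_break_camelcase string → Spec_break_camelcase string (break_camelcase string)

-- ===== LEMMAS AND PROOFS =====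

-- B's per-character emitter (proof-side name for the lambda in the port of B)
def pvEmit (c : Char) : List Char := if PySem.Chars.isupper c then [' ', c] else [c]

lemma pvJoinNilFlatten (ps : List (List Char)) : PySem.Chars.join [] ps = ps.flatten := by
  induction ps with
  | nil => simp [PySem.Chars.join_nil]
  | cons p rest ih =>
    cases rest with
    | nil => simp [PySem.Chars.join_singleton]
    | cons q rs => simp [PySem.Chars.join_cons_cons, ih]

lemma pvLoopA (s : List Char) : ∀ (k a last : Nat) (res : List Char),
    a + k = s.length → last ≤ a →
    (let p := (PySem.List.pyRange (a : Int) (s.length : Int) 1).foldl (pvStepA s) (res, (last : Int));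
      p.1 ++ PySem.List.slice s (some p.2) none)
    = res ++ PySem.List.slice s (some (last : Int)) (some (a : Int)) ++ (s.drop a).flatMap pvEmit := by
  intro k
  induction k with
  | zero =>
    intro a last res ha hl
    have haa : a = s.length := by omega
    subst haa
    rw [PySem.List.pyRange_one_eq_nil le_rfl]
    simp only [List.foldl_nil, PySem.List.slice_from_natCast, PySem.List.slice_natCast]
    rw [List.take_of_length_le (by simp)]
    simp
  | succ k ih =>
    intro a last res ha hl
    have hlt : a < s.length := by omega
    rw [PySem.List.pyRange_one_cons (by exact_mod_cast hlt), List.foldl_cons]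
    have hget : PySem.List.pyGetD s (a : Int) ' ' = s[a] := by
      simp [PySem.List.pyGetD_natCast, List.getD_eq_getElem?_getD, List.getElem?_eq_getElem hlt]
    have hdrop : s.drop a = s[a] :: s.drop (a + 1) := List.drop_eq_getElem_cons hlt
    by_cases hU : PySem.Chars.isupper s[a]
    · have hstep : pvStepA s (res, (last : Int)) (a : Int)
          = (res ++ PySem.List.slice s (some (last : Int)) (some (a : Int)) ++ [' '], (a : Int)) := by
        simp [pvStepA, hget, hU]
      rw [hstep]
      have := ih (a + 1) a (res ++ PySem.List.slice s (some (last : Int)) (some (a : Int)) ++ [' '])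
        (by omega) (by omega)
      push_cast at this ⊢
      rw [this]
      have hsl : PySem.List.slice s (some (a : Int)) (some ((a : Int) + 1)) = [s[a]] := by
        have := PySem.List.slice_natCast_add (xs := s) (j := a) (n := 1)
        push_cast at this
        rw [this, List.take_one, hdrop]
        rfl
      rw [hsl, hdrop, List.flatMap_cons,
        show pvEmit s[a] = [' ', s[a]] from by simp [pvEmit, hU]]
      simp
    · have hstep : pvStepA s (res, (last : Int)) (a : Int) = (res, (last : Int)) := by
        simp [pvStepA, hget, hU]
      rw [hstep]
      have := ih (a + 1) last res (by omega) (by omega)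
      push_cast at this ⊢
      rw [this]
      have hsl : PySem.List.slice s (some (last : Int)) (some ((a : Int) + 1))
          = PySem.List.slice s (some (last : Int)) (some (a : Int)) ++ [s[a]] := by
        have h1 := PySem.List.slice_natCast (xs := s) (a := last) (b := a + 1)
        have h2 := PySem.List.slice_natCast (xs := s) (a := last) (b := a)
        push_cast at h1 h2
        rw [h1, h2]
        have hsub : (a : Nat) + 1 - last = (a - last) + 1 := by omega
        rw [hsub, List.take_add_one]
        congr 1
        have : (s.drop last)[a - last]? = some s[a] := by
          rw [List.getElem?_drop]
          rw [show last + (a - last) = a by omega]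
          exact List.getElem?_eq_getElem hlt
        simp [this]
      rw [hsl, hdrop, List.flatMap_cons,
        show pvEmit s[a] = [s[a]] from by simp [pvEmit, hU]]
      simp

-- ===== VERDICT (by name: the statement is the Claim_ definition above) =====
theorem break_camelcase_spec : Claim_equal_break_camelcase := by
  intro string _
  unfold Spec_break_camelcase break_camelcase break_camelcase_alt
  have h := pvLoopA string.toList string.toList.length 0 0 [] (by omega) le_rfl
  push_cast at h
  simp only [] at h ⊢
  rw [h, pvJoinNilFlatten]
  simp [pysem, List.flatMap_def]
  rfl
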